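-- pv_equiv track=rewrite | github.com/manuteou/Cr-ation-de-fiche-perso-CO | COFICHEPERSO/Main_program.py | attribut_modification
-- ===== SOURCE A (Python) =====
-- def attribut_modification(player_attribut):
--     """fonction who calcul the player bonus attribut"""
--     table = {
--         1: -4, 2: -4, 3: -4,
--         4: -3, 5: -3, 6: -2,
--         7: -2, 8: -1, 9: -1,
--         10: 0, 11: 0, 12: 1,
--         13: 1, 14: 2, 15: 2,
--         16: 3, 17: 3, 18: 4,
--         19: 4, 20: 5, 21: 5
--     }
--
--     for table_attribut_key, modification_value in table.items():
--         if table_attribut_key == player_attribut: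
--             return modification_value
-- ===== SOURCE B (Python) =====
-- def attribut_modification(player_attribut):
--     """fonction who calcul the player bonus attribut"""
--     if 1 <= player_attribut <= 21:
--         return max((player_attribut - 10) // 2, -4)
-- ===== Notes on version B (the rewrite author's own statement) =====
-- stated objective: idiomatic
-- what changed: Replaced the 21-entry lookup table and linear scan with the closed-form D&D modifier max((n-10)//2, -4) guarded by a 1..21 range check.
import Mathlib
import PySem

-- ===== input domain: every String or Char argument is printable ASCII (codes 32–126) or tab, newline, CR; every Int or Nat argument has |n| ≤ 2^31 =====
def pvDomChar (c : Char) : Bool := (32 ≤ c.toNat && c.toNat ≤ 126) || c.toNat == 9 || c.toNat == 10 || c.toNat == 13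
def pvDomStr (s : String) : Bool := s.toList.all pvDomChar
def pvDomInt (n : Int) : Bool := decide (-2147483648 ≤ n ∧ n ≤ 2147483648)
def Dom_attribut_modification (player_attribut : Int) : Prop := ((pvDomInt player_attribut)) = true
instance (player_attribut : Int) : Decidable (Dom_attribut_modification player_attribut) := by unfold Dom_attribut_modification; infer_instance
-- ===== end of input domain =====

-- B replaces the lookup table and scan with the closed-form modifier max((n-10)//2, -4) on 1..21 (idiomatic).


-- ===== PORT A =====
-- the dict literal, in insertion order
def attrTable : List (Int × Int) :=
  [(1, -4), (2, -4), (3, -4),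
   (4, -3), (5, -3), (6, -2),
   (7, -2), (8, -1), (9, -1),
   (10, 0), (11, 0), (12, 1),
   (13, 1), (14, 2), (15, 2),
   (16, 3), (17, 3), (18, 4),
   (19, 4), (20, 5), (21, 5)]

-- the 'for … in table.items(): if key == player_attribut: return value' loop
def attrScan (player_attribut : Int) : List (Int × Int) → Option Int
  | [] => none
  | (k, v) :: rest => if k == player_attribut then some v else attrScan player_attribut rest

def attribut_modification (player_attribut : Int) : Option Int :=
  attrScan player_attribut attrTable

-- ===== PORT B =====
def attribut_modification_alt (player_attribut : Int) : Option Int :=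
  if 1 ≤ player_attribut ∧ player_attribut ≤ 21 then
    some (max (PySem.Int.floordiv (player_attribut - 10) 2) (-4))
  else none

-- ===== PRECONDITION & SPEC =====
def Spec_attribut_modification (player_attribut : Int) (out : Option Int) : Prop := out = attribut_modification_alt player_attribut
instance (player_attribut : Int) (out : Option Int) : Decidable (Spec_attribut_modification player_attribut out) := by unfold Spec_attribut_modification; infer_instance

-- ===== CLAIM =====
def Claim_equal_attribut_modification : Prop := ∀ (player_attribut : Int), Dom_attribut_modification player_attribut → Spec_attribut_modification player_attribut (attribut_modification player_attribut)

-- ===== LEMMAS AND PROOFS =====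
theorem attrScan_none (n : Int) : ∀ l : List (Int × Int), (∀ p ∈ l, p.1 ≠ n) → attrScan n l = none := by
  intro l
  induction l with
  | nil => intro _; rfl
  | cons hd tl ih =>
      intro h
      have hk : hd.1 ≠ n := h hd (List.mem_cons_self ..)
      simp only [attrScan, beq_iff_eq]
      rw [if_neg hk]
      exact ih fun p hp => h p (List.mem_cons_of_mem _ hp)

theorem attrTable_keys : ∀ p ∈ attrTable, 1 ≤ p.1 ∧ p.1 ≤ 21 := by decide

theorem attr_eq (n : Int) : attribut_modification n = attribut_modification_alt n := by
  by_cases h : 1 ≤ n ∧ n ≤ 21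
  · obtain ⟨hl, hr⟩ := h
    interval_cases n <;> decide
  · have hn : attrScan n attrTable = none :=
      attrScan_none n attrTable fun p hp => by
        have := attrTable_keys p hp; omega
    simp [attribut_modification, hn, attribut_modification_alt, h]

-- ===== VERDICT =====
theorem attribut_modification_spec : Claim_equal_attribut_modification := by
  intro n _
  exact attr_eq n
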